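-- pv_equiv track=rewrite | github.com/utilmind/MySQL-migration-tools | bash/strip-mysql-compatibility-comments.py | find_conditional_end
-- ===== SOURCE A (Python) =====
-- def find_conditional_end(comment):
--     """
--     Given a string that starts with a versioned comment:
--
--         /*!<digits>...
--
--     find the index of the closing "*/" that terminates THIS comment,
--     correctly handling nested regular block comments "/* ... */" inside.
--
--     Returns:
--         (end_pos, digits_end)
--
--         end_pos    - index where the closing "*/" starts (or None if not found)
--         digits_end - index right after the version digits (i.e. start of inner content)
--     """
--     n = len(comment)
--     # comment[0:3] should be "/*!"
--     j = 3
--     while j < n and comment[j].isdigit():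
--         j += 1
--     digits_end = j
--     version_str = comment[3:digits_end]
--     if not version_str:
--         return None, None
--
--     depth = 0
--     k = digits_end
--     end_pos = None
--
--     while k < n - 1:
--         two = comment[k:k + 2]
--
--         if two == "/*":
--             # nested regular block comment
--             depth += 1
--             k += 2
--             continue
--
--         if two == "*/":
--             if depth == 0:
--                 end_pos = k
--                 break
--             else:
--                 depth -= 1
--                 k += 2
--                 continue
--
--         k += 1
--
--     return end_pos, digits_end
-- ===== SOURCE B (Python) =====
-- import re
--
-- def find_conditional_end(comment):
--     # version digits right after "/*!"
--     m = re.match(r'\d*', comment[3:])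
--     digits_end = 3 + m.end()
--     if digits_end == 3:
--         return None, None
--
--     def skip_block(i):
--         # comment[i:] is inside a nested "/*": return index just past its matching "*/", or None
--         while True:
--             c = comment.find('*/', i)
--             if c == -1:
--                 return None
--             o = comment.find('/*', i)
--             if o != -1 and o < c:
--                 i = skip_block(o + 2)
--                 if i is None:
--                     return None
--             else:
--                 return c + 2
--
--     i = digits_end
--     while True:
--         c = comment.find('*/', i)
--         if c == -1:
--             return None, digits_end
--         o = comment.find('/*', i)
--         if o != -1 and o < c:
--             i = skip_block(o + 2)
--             if i is None:
--                 return None, digits_end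
--         else:
--             return c, digits_end
-- ===== Notes on version B (the rewrite author's own statement) =====
-- stated objective: alternative
-- what changed: Replaces A's char-by-char scan with an explicit depth counter by a recursive-descent matcher: str.find jumps straight to the next comment delimiter and nested comments are consumed by a recursive skip_block helper, so there is no depth variable and no per-character loop.
import Mathlib
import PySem

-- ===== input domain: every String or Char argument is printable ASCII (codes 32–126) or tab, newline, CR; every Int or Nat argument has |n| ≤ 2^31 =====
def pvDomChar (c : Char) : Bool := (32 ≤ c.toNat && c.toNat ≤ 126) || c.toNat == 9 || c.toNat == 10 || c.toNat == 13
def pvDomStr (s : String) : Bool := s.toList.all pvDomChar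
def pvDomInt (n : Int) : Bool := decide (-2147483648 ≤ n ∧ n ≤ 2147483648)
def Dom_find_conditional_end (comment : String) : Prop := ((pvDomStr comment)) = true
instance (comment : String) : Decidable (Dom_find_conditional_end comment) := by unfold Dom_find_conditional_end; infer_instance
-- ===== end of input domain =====

-- B replaces A's depth-counter char-by-char scan with a recursive-descent matcher that jumps
-- between delimiters via str.find and skips nested comments by recursion; objective: alternative.

-- ===== PORT A =====
-- while j < n and comment[j].isdigit(): j += 1
def pvScanDigits (cs : List Char) (j : Nat) : Nat :=
  if h : j < cs.length then
    if PySem.Chars.isdigit cs[j] then pvScanDigits cs (j + 1) else j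
  else j
termination_by cs.length - j

-- A's main while-loop: k, depth; two = comment[k:k+2]
def pvLoopA (cs : List Char) (k : Nat) (depth : Nat) : Option Int :=
  if k + 1 < cs.length then
    let two := PySem.List.slice cs (some (k : Int)) (some ((k : Int) + 2))
    if two = ['/', '*'] then pvLoopA cs (k + 2) (depth + 1)
    else if two = ['*', '/'] then
      if depth = 0 then some (k : Int) else pvLoopA cs (k + 2) (depth - 1)
    else pvLoopA cs (k + 1) depth
  else none
termination_by cs.length - k

def find_conditional_end (comment : String) : Option Int × Option Int :=
  let cs := comment.toList
  let digits_end := pvScanDigits cs 3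
  let version_str := PySem.List.slice cs (some 3) (some (digits_end : Int))
  if version_str = [] then (none, none)
  else (pvLoopA cs digits_end 0, some (digits_end : Int))

-- ===== PORT B =====
-- comment.find(ab, i) for a two-char needle ab = ⟨a, b⟩ (first occurrence at index ≥ i, none = -1)
def pvFindFrom (cs : List Char) (a b : Char) (i : Nat) : Option Nat :=
  if h : i + 1 < cs.length then
    if cs[i]'(by omega) = a ∧ cs[i + 1] = b then some i else pvFindFrom cs a b (i + 1)
  else none
termination_by cs.length - i

-- skip_block(i): inside a nested "/*", return index just past its matching "*/", or none.
-- Python's recursion has no fuel; the fuel argument is only a totality guard (cs.length suffices).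
def pvSkip (cs : List Char) : Nat → Nat → Option Nat
  | 0, _ => none
  | f + 1, i =>
    match pvFindFrom cs '*' '/' i with
    | none => none
    | some c =>
      match pvFindFrom cs '/' '*' i with
      | some o =>
        if o < c then
          match pvSkip cs f (o + 2) with
          | none => none
          | some j => pvSkip cs f j
        else some (c + 2)
      | none => some (c + 2)

-- B's top-level while-loop (fuel is again only a totality guard)
def pvMainB (cs : List Char) : Nat → Nat → Option Int
  | 0, _ => none
  | f + 1, i =>
    match pvFindFrom cs '*' '/' i with
    | none => none
    | some c =>
      match pvFindFrom cs '/' '*' i with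
      | some o =>
        if o < c then
          match pvSkip cs f (o + 2) with
          | none => none
          | some j => pvMainB cs f j
        else some (c : Int)
      | none => some (c : Int)

def find_conditional_end_alt (comment : String) : Option Int × Option Int :=
  let cs := comment.toList
  let ver := (cs.drop 3).takeWhile PySem.Chars.isdigit   -- re.match(r'\d*', comment[3:])
  if ver.length = 0 then (none, none)
  else
    let digits_end := 3 + ver.length
    (pvMainB cs cs.length digits_end, some (digits_end : Int))

-- ===== PRECONDITION & SPEC =====
def Spec_find_conditional_end (comment : String) (out : Option Int × Option Int) : Prop := out = find_conditional_end_alt comment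
instance (comment : String) (out : Option Int × Option Int) : Decidable (Spec_find_conditional_end comment out) := by unfold Spec_find_conditional_end; infer_instance

-- ===== CLAIM =====
def Claim_equal_find_conditional_end : Prop := ∀ (comment : String), Dom_find_conditional_end comment → Spec_find_conditional_end comment (find_conditional_end comment)

-- ===== LEMMAS AND PROOFS =====

theorem pvScanDigits_eq (cs : List Char) (j : Nat) :
    pvScanDigits cs j = j + ((cs.drop j).takeWhile PySem.Chars.isdigit).length := by
  unfold pvScanDigits
  split_ifs with h hd
  · rw [pvScanDigits_eq cs (j+1)]
    rw [List.drop_eq_getElem_cons h, List.takeWhile_cons, hd]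
    simp; omega
  · rw [List.drop_eq_getElem_cons h, List.takeWhile_cons]
    simp [hd]
  · rw [List.drop_of_length_le (by omega)]
    simp
termination_by cs.length - j

theorem pvSliceTwo (cs : List Char) (k : Nat) (h : k + 1 < cs.length) :
    PySem.List.slice cs (some (k : Int)) (some ((k : Int) + 2)) =
      [cs[k], cs[k + 1]] := by
  have h2 : ((k : Int) + 2) = ((k : Int) + ((2 : Nat) : Int)) := by push_cast; ring
  have e1 : cs.drop k = cs[k] :: cs.drop (k + 1) := List.drop_eq_getElem_cons (by omega)
  have e2 : cs.drop (k + 1) = cs[k + 1] :: cs.drop (k + 2) := List.drop_eq_getElem_cons h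
  rw [h2, PySem.List.slice_natCast_add, e1, e2]
  rfl

theorem pvFindFrom_of_len (cs : List Char) (a b : Char) (i : Nat) (h : ¬ i + 1 < cs.length) :
    pvFindFrom cs a b i = none := by
  rw [pvFindFrom, dif_neg h]

theorem pvFindFrom_spec (cs : List Char) (a b : Char) (i p : Nat)
    (h : pvFindFrom cs a b i = some p) :
    i ≤ p ∧ ∃ hp : p + 1 < cs.length, cs[p]'(by omega) = a ∧ cs[p + 1] = b := by
  rw [pvFindFrom] at h
  split_ifs at h with h1 h2
  · cases h; exact ⟨le_rfl, h1, h2⟩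
  · obtain ⟨hle, rest⟩ := pvFindFrom_spec cs a b (i + 1) p h
    exact ⟨by omega, rest⟩
termination_by cs.length - i

theorem pvFindFrom_between (cs : List Char) (a b : Char) (i q p : Nat)
    (h : pvFindFrom cs a b i = some p) (h1 : i ≤ q) (h2 : q ≤ p) :
    pvFindFrom cs a b q = some p := by
  rcases eq_or_lt_of_le h1 with rfl | hlt
  · exact h
  · by_cases hl : i + 1 < cs.length
    · rw [pvFindFrom, dif_pos hl] at h
      by_cases hm : cs[i]'(by omega) = a ∧ cs[i + 1] = b
      · rw [if_pos hm] at h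
        cases h
        exact absurd h2 (by omega)
      · rw [if_neg hm] at h
        exact pvFindFrom_between cs a b (i + 1) q p h (by omega) h2
    · rw [pvFindFrom, dif_neg hl] at h
      exact absurd h (by simp)
termination_by q - i

theorem pvFindFrom_none_mono (cs : List Char) (a b : Char) (i q : Nat)
    (h : pvFindFrom cs a b i = none) (h1 : i ≤ q) :
    pvFindFrom cs a b q = none := by
  rcases eq_or_lt_of_le h1 with rfl | hlt
  · exact h
  · by_cases hl : i + 1 < cs.length
    · rw [pvFindFrom, dif_pos hl] at h
      by_cases hm : cs[i]'(by omega) = a ∧ cs[i + 1] = b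
      · rw [if_pos hm] at h
        exact absurd h (by simp)
      · rw [if_neg hm] at h
        exact pvFindFrom_none_mono cs a b (i + 1) q h (by omega)
    · exact pvFindFrom_of_len cs a b q (by omega)
termination_by q - i

theorem pvSkip_ge (cs : List Char) (f i j : Nat) (h : pvSkip cs f i = some j) :
    i + 2 ≤ j := by
  match f with
  | 0 => exact absurd h (by simp [pvSkip])
  | f + 1 =>
    rw [pvSkip] at h
    cases hc : pvFindFrom cs '*' '/' i with
    | none => rw [hc] at h; exact absurd h (by simp)
    | some c =>
      rw [hc] at h
      dsimp only at h
      have hci := (pvFindFrom_spec cs _ _ _ _ hc).1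
      cases ho : pvFindFrom cs '/' '*' i with
      | none =>
        rw [ho] at h
        dsimp only at h
        cases h
        omega
      | some o =>
        rw [ho] at h
        dsimp only at h
        have hoi := (pvFindFrom_spec cs _ _ _ _ ho).1
        split_ifs at h with hoc
        · cases hs : pvSkip cs f (o + 2) with
          | none => rw [hs] at h; exact absurd h (by simp)
          | some j1 =>
            rw [hs] at h
            dsimp only at h
            have h1 := pvSkip_ge cs f (o + 2) j1 hs
            have h2 := pvSkip_ge cs f j1 j h
            omega
        · cases h; omega

-- stepping pvLoopA past a position that holds no delimiter token
theorem pvLoopA_congr (cs : List Char) (i t d : Nat) (hle : i ≤ t)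
    (hc : pvFindFrom cs '*' '/' i = pvFindFrom cs '*' '/' t)
    (ho : pvFindFrom cs '/' '*' i = pvFindFrom cs '/' '*' t) :
    pvLoopA cs i d = pvLoopA cs t d := by
  rcases eq_or_lt_of_le hle with rfl | hlt
  · rfl
  · by_cases hl : i + 1 < cs.length
    · have hnopen : ¬ (cs[i]'(by omega) = '/' ∧ cs[i + 1] = '*') := by
        intro hm
        have : pvFindFrom cs '/' '*' i = some i := by rw [pvFindFrom, dif_pos hl, if_pos hm]
        rw [this] at ho
        have := (pvFindFrom_spec cs _ _ _ _ ho.symm).1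
        omega
      have hnclose : ¬ (cs[i]'(by omega) = '*' ∧ cs[i + 1] = '/') := by
        intro hm
        have : pvFindFrom cs '*' '/' i = some i := by rw [pvFindFrom, dif_pos hl, if_pos hm]
        rw [this] at hc
        have := (pvFindFrom_spec cs _ _ _ _ hc.symm).1
        omega
      have hstep : pvLoopA cs i d = pvLoopA cs (i + 1) d := by
        rw [pvLoopA, if_pos hl]
        simp only [pvSliceTwo cs i hl, List.cons.injEq, and_true]
        rw [if_neg hnopen, if_neg hnclose]
      have hcs : pvFindFrom cs '*' '/' i = pvFindFrom cs '*' '/' (i + 1) := by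
        rw [pvFindFrom, dif_pos hl, if_neg hnclose]
      have hos : pvFindFrom cs '/' '*' i = pvFindFrom cs '/' '*' (i + 1) := by
        rw [pvFindFrom, dif_pos hl, if_neg hnopen]
      rw [hstep]
      exact pvLoopA_congr cs (i + 1) t d (by omega) (hcs ▸ hc) (hos ▸ ho)
    · have h1 : pvLoopA cs i d = none := by rw [pvLoopA, if_neg hl]
      have h2 : pvLoopA cs t d = none := by rw [pvLoopA, if_neg (by omega)]
      rw [h1, h2]
termination_by t - i

theorem pvLoopA_none_of_no_close (cs : List Char) (i d : Nat)
    (h : pvFindFrom cs '*' '/' i = none) : pvLoopA cs i d = none := by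
  rw [pvLoopA]
  by_cases hl : i + 1 < cs.length
  · rw [if_pos hl]
    simp only [pvSliceTwo cs i hl, List.cons.injEq, and_true]
    rw [pvFindFrom, dif_pos hl] at h
    have hnclose : ¬ (cs[i]'(by omega) = '*' ∧ cs[i + 1] = '/') := by
      intro hm; rw [if_pos hm] at h; exact absurd h (by simp)
    rw [if_neg hnclose] at h
    rw [if_neg hnclose]
    by_cases hopen : cs[i]'(by omega) = '/' ∧ cs[i + 1] = '*'
    · rw [if_pos hopen]
      exact pvLoopA_none_of_no_close cs (i + 2) (d + 1)
        (pvFindFrom_none_mono cs _ _ _ _ h (by omega))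
    · rw [if_neg hopen]
      exact pvLoopA_none_of_no_close cs (i + 1) d h
  · rw [if_neg hl]
termination_by cs.length - i

-- the heart: A's depth-counter loop equals B's recursive-descent walk (fuel f sufficient)
theorem pvMainRel (cs : List Char) (f : Nat) : ∀ (i : Nat), cs.length ≤ f + i →
    (∀ d, pvLoopA cs i (d + 1) =
      (match pvSkip cs f i with | none => none | some j => pvLoopA cs j d)) ∧
    pvLoopA cs i 0 = pvMainB cs f i := by
  induction f with
  | zero =>
    intro i hi
    have hA : ∀ d, pvLoopA cs i d = none := by
      intro d; rw [pvLoopA, if_neg (by omega)]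
    refine ⟨fun d => ?_, ?_⟩
    · rw [hA]; rfl
    · rw [hA]; rfl
  | succ f ih =>
    intro i hi
    cases hc : pvFindFrom cs '*' '/' i with
    | none =>
      have hA : ∀ d, pvLoopA cs i d = none := fun d => pvLoopA_none_of_no_close cs i d hc
      refine ⟨fun d => ?_, ?_⟩
      · rw [hA, pvSkip, hc]
      · rw [hA, pvMainB, hc]
    | some c =>
      obtain ⟨hic, hcl, hc1, hc2⟩ := pvFindFrom_spec cs _ _ _ _ hc
      cases ho : pvFindFrom cs '/' '*' i with
      | none =>
        -- first (and only) token kind ahead is "*/" at c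
        have hreach : ∀ d, pvLoopA cs i d = pvLoopA cs c d := by
          intro d
          refine pvLoopA_congr cs i c d hic ?_ ?_
          · rw [hc, (pvFindFrom_between cs _ _ i c c hc hic le_rfl)]
          · rw [ho, (pvFindFrom_none_mono cs _ _ i c ho hic)]
        have hnopen : ¬ (cs[c]'(by omega) = '/' ∧ cs[c + 1] = '*') := by
          intro hm; rw [hc1] at hm; exact absurd hm.1 (by decide)
        have hstep : ∀ d, pvLoopA cs c d =
            (if d = 0 then some (c : Int) else pvLoopA cs (c + 2) (d - 1)) := by
          intro d
          rw [pvLoopA, if_pos hcl]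
          simp only [pvSliceTwo cs c hcl, List.cons.injEq, and_true]
          rw [if_neg hnopen, if_pos ⟨hc1, hc2⟩]
        refine ⟨fun d => ?_, ?_⟩
        · rw [hreach, hstep, pvSkip, hc, ho]
          simp
        · rw [hreach, hstep, pvMainB, hc, ho]
          simp
      | some o =>
        obtain ⟨hio, hol, ho1, ho2⟩ := pvFindFrom_spec cs _ _ _ _ ho
        by_cases hoc : o < c
        · -- first token ahead is "/*" at o
          have hreach : ∀ d, pvLoopA cs i d = pvLoopA cs o d := by
            intro d
            refine pvLoopA_congr cs i o d hio ?_ ?_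
            · rw [hc, (pvFindFrom_between cs _ _ i o c hc hio (by omega))]
            · rw [ho, (pvFindFrom_between cs _ _ i o o ho hio le_rfl)]
          have hstep : ∀ d, pvLoopA cs o d = pvLoopA cs (o + 2) (d + 1) := by
            intro d
            rw [pvLoopA, if_pos hol]
            simp only [pvSliceTwo cs o hol, List.cons.injEq, and_true]
            rw [if_pos ⟨ho1, ho2⟩]
          have hfo : cs.length ≤ f + (o + 2) := by omega
          refine ⟨fun d => ?_, ?_⟩
          · rw [hreach, hstep, pvSkip, hc, ho]
            dsimp only
            rw [if_pos hoc]
            cases hs : pvSkip cs f (o + 2) with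
            | none =>
              have h1 := (ih (o + 2) hfo).1 (d + 1)
              rw [hs] at h1
              dsimp only at h1
              exact h1
            | some j =>
              have h1 := (ih (o + 2) hfo).1 (d + 1)
              rw [hs] at h1
              dsimp only at h1
              have hj : cs.length ≤ f + j := by
                have := pvSkip_ge cs f (o + 2) j hs; omega
              have h2 := (ih j hj).1 d
              dsimp only
              rw [h1]
              exact h2
          · rw [hreach, hstep, pvMainB, hc, ho]
            dsimp only
            rw [if_pos hoc]
            cases hs : pvSkip cs f (o + 2) with
            | none =>
              have h1 := (ih (o + 2) hfo).1 0
              rw [hs] at h1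
              dsimp only at h1
              exact h1
            | some j =>
              have h1 := (ih (o + 2) hfo).1 0
              rw [hs] at h1
              dsimp only at h1
              have hj : cs.length ≤ f + j := by
                have := pvSkip_ge cs f (o + 2) j hs; omega
              have h2 := (ih j hj).2
              dsimp only
              rw [h1]
              exact h2
        · -- first token ahead is "*/" at c (c < o)
          have hco : c ≤ o := by omega
          have hreach : ∀ d, pvLoopA cs i d = pvLoopA cs c d := by
            intro d
            refine pvLoopA_congr cs i c d hic ?_ ?_
            · rw [hc, (pvFindFrom_between cs _ _ i c c hc hic le_rfl)]
            · rw [ho, (pvFindFrom_between cs _ _ i c o ho hic hco)]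
          have hnopen : ¬ (cs[c]'(by omega) = '/' ∧ cs[c + 1] = '*') := by
            intro hm; rw [hc1] at hm; exact absurd hm.1 (by decide)
          have hstep : ∀ d, pvLoopA cs c d =
              (if d = 0 then some (c : Int) else pvLoopA cs (c + 2) (d - 1)) := by
            intro d
            rw [pvLoopA, if_pos hcl]
            simp only [pvSliceTwo cs c hcl, List.cons.injEq, and_true]
            rw [if_neg hnopen, if_pos ⟨hc1, hc2⟩]
          refine ⟨fun d => ?_, ?_⟩
          · rw [hreach, hstep, pvSkip, hc, ho]
            simp [hoc]
          · rw [hreach, hstep, pvMainB, hc, ho]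
            simp [hoc]

theorem pvMainAssemble (cs : List Char) :
    (if PySem.List.slice cs (some 3) (some ((pvScanDigits cs 3 : Nat) : Int)) = []
       then ((none, none) : Option Int × Option Int)
       else (pvLoopA cs (pvScanDigits cs 3) 0, some ((pvScanDigits cs 3 : Nat) : Int)))
    = (if ((cs.drop 3).takeWhile PySem.Chars.isdigit).length = 0
         then ((none, none) : Option Int × Option Int)
         else (pvMainB cs cs.length (3 + ((cs.drop 3).takeWhile PySem.Chars.isdigit).length),
               some ((3 + ((cs.drop 3).takeWhile PySem.Chars.isdigit).length : Nat) : Int))) := by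
  have hscan := pvScanDigits_eq cs 3
  set ver := (cs.drop 3).takeWhile PySem.Chars.isdigit with hver
  have hpre : ver <+: cs.drop 3 := List.takeWhile_prefix _
  have htake : (cs.drop 3).take ver.length = ver := (List.prefix_iff_eq_take.mp hpre).symm
  have hslice : PySem.List.slice cs (some 3) (some ((pvScanDigits cs 3 : Nat) : Int)) = ver := by
    rw [hscan]
    have h4 : (((3 + ver.length : Nat) : Nat) : Int) = ((3 : Nat) : Int) + ((ver.length : Nat) : Int) := by
      push_cast; ring
    have h3 : (some (3 : Int)) = some ((3 : Nat) : Int) := by norm_num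
    rw [h4, h3, PySem.List.slice_natCast_add, htake]
  rw [hslice]
  by_cases hv : ver = []
  · rw [if_pos hv, if_pos (by simp [hv])]
  · rw [if_neg hv, if_neg (by simp [hv]), hscan]
    have := (pvMainRel cs cs.length (3 + ver.length) (by omega)).2
    rw [this]

-- ===== VERDICT =====
theorem find_conditional_end_spec : Claim_equal_find_conditional_end := by
  intro comment _
  exact pvMainAssemble comment.toList
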